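-- pv_equiv track=rewrite | github.com/austinrtn/CuteDumbMalicious | sims/game.py | tiered_score
-- ===== SOURCE A (Python) =====
-- def tiered_score(n: int) -> int:
--     """Score surviving points using the tiered curve.
--     Groups of 3, per-point value increases by 5 each group starting at 10."""
--     if n <= 0:
--         return 0
--     total = 0
--     group = 0
--     remaining = n
--     while remaining > 0:
--         take = min(3, remaining)
--         per_point = 10 + group * 5
--         total += take * per_point
--         remaining -= take
--         group += 1
--     return total
-- ===== SOURCE B (Python) =====
-- def tiered_score(n: int) -> int:
--     """Closed-form: full groups of 3 via arithmetic series, plus remainder group."""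
--     if n <= 0:
--         return 0
--     g, r = divmod(n, 3)
--     return 30 * g + 15 * g * (g - 1) // 2 + r * (10 + 5 * g)
-- ===== Notes on version B (the rewrite author's own statement) =====
-- stated objective: faster
-- what changed: Replaced the per-group while loop with a closed-form arithmetic-series formula over full groups of 3 plus the remainder group.
import Mathlib
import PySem

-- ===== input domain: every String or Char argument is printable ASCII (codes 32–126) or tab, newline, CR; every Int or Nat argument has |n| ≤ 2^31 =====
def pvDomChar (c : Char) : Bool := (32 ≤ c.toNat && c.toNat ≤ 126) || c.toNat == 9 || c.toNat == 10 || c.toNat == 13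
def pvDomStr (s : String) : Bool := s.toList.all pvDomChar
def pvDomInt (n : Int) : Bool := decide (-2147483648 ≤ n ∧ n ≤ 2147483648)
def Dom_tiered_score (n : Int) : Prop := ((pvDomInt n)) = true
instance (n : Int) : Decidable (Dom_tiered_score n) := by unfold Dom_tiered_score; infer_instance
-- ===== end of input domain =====

-- B replaces A's per-group loop with a closed-form arithmetic-series formula (objective: faster).

-- ===== PORT A =====
-- A's while loop: state (remaining, total, group), one recursive call per group.
def tieredLoop (remaining total group : Int) : Int :=
  if remaining > 0 then
    let take := min 3 remaining
    let per_point := 10 + group * 5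
    tieredLoop (remaining - take) (total + take * per_point) (group + 1)
  else total
termination_by remaining.toNat
decreasing_by simp only [min_def]; split <;> omega

def tiered_score (n : Int) : Int :=
  if n ≤ 0 then 0 else tieredLoop n 0 0

-- ===== PORT B =====
def tiered_score_alt (n : Int) : Int :=
  if n ≤ 0 then 0
  else
    let g := PySem.Int.floordiv n 3
    let r := PySem.Int.mod n 3
    30 * g + PySem.Int.floordiv (15 * g * (g - 1)) 2 + r * (10 + 5 * g)

-- ===== PRECONDITION & SPEC =====
def Spec_tiered_score (n : Int) (out : Int) : Prop := out = tiered_score_alt n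
instance (n : Int) (out : Int) : Decidable (Spec_tiered_score n out) := by unfold Spec_tiered_score; infer_instance

-- ===== CLAIM (what is proved, stated in full; the proofs are below) =====
def Claim_equal_tiered_score : Prop := ∀ (n : Int), Dom_tiered_score n → Spec_tiered_score n (tiered_score n)

-- ===== LEMMAS AND PROOFS =====

-- Closed form of the loop tail, with group offset g and nonnegative remaining k.
def closedW (k : Nat) (g : Int) : Int :=
  let q : Int := (k : Int) / 3
  let r : Int := (k : Int) % 3
  3 * q * (10 + 5 * g) + (15 * (q * (q - 1))) / 2 + r * (10 + 5 * (g + q))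

theorem closedW_step (k : Nat) (g : Int) :
    closedW (k + 3) g = 3 * (10 + g * 5) + closedW k (g + 1) := by
  unfold closedW
  have hq : ((k : Int) + 3) / 3 = (k : Int) / 3 + 1 := by omega
  have hr : ((k : Int) + 3) % 3 = (k : Int) % 3 := by omega
  push_cast
  rw [hq, hr]
  set q : Int := (k : Int) / 3 with hqdef
  have hq0 : 0 ≤ q := by positivity
  have htri : (15 * ((q + 1) * (q + 1 - 1))) / 2 = (15 * (q * (q - 1))) / 2 + 15 * q := by
    have h : 15 * ((q + 1) * (q + 1 - 1)) = 15 * (q * (q - 1)) + 2 * (15 * q) := by ring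
    rw [h, Int.add_mul_ediv_left _ _ (by norm_num : (2:Int) ≠ 0)]
  rw [htri]
  ring

theorem loop_closed (k : Nat) : ∀ (t g : Int),
    tieredLoop (k : Int) t g = t + closedW k g := by
  induction k using Nat.strong_induction_on with
  | _ k ih =>
    intro t g
    match k with
    | 0 => unfold tieredLoop closedW; norm_num
    | 1 =>
      unfold tieredLoop closedW
      norm_num [min_def]
      unfold tieredLoop
      norm_num; ring
    | 2 =>
      unfold tieredLoop closedW
      norm_num [min_def]
      unfold tieredLoop
      norm_num; ring
    | (m + 3) =>
      rw [tieredLoop]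
      have hpos : ((m : Int) + 3) > 0 := by positivity
      have hmin : min (3:Int) ((m:Int) + 3) = 3 := by omega
      push_cast
      rw [if_pos hpos]
      simp only [hmin]
      have := ih m (by omega) (t + 3 * (10 + g * 5)) (g + 1)
      have harg : (m : Int) + 3 - 3 = (m : Int) := by ring
      rw [harg, this, closedW_step]
      ring

-- ===== VERDICT (by name: the statement is the Claim_ definition above) =====
theorem tiered_score_spec : Claim_equal_tiered_score := by
  intro n _
  unfold Spec_tiered_score tiered_score tiered_score_alt
  by_cases h : n ≤ 0
  · simp [h]
  · rw [if_neg h, if_neg h]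
    have hn : n = ((n.toNat : Nat) : Int) := by omega
    rw [hn, loop_closed, ← hn]
    simp only [closedW,
      PySem.Int.floordiv_eq_ediv_of_pos (show (0:Int) < 3 by norm_num),
      PySem.Int.mod_eq_emod_of_pos (show (0:Int) < 3 by norm_num),
      PySem.Int.floordiv_eq_ediv_of_pos (show (0:Int) < 2 by norm_num)]
    ring_nf
    rw [← hn]
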